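-- pv_equiv track=rewrite | github.com/vipulthakur8/project-euler | domination_numbers.py | dom_num
-- ===== SOURCE A (Python) =====
-- def dom_num(num: int) -> bool:
-- 	dic = {}
-- 	for i in str(num):
-- 		if i in dic:
-- 			dic[i] += 1
-- 		else:
-- 			dic[i] = 1
--
-- 	for key in dic:
-- 		if dic[key] > len(str(num))//2:
-- 			return True
-- 	return False
-- ===== SOURCE B (Python) =====
-- def dom_num(num: int) -> bool:
--     s = str(num)
--     half = len(s) // 2
--     return any(s.count(c) > half for c in s)
-- ===== Notes on version B (the rewrite author's own statement) =====
-- stated objective: simpler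
-- what changed: Replaces the frequency-dict build plus key scan with a single any() over the digits, counting each character's occurrences directly with str.count.
import Mathlib
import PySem

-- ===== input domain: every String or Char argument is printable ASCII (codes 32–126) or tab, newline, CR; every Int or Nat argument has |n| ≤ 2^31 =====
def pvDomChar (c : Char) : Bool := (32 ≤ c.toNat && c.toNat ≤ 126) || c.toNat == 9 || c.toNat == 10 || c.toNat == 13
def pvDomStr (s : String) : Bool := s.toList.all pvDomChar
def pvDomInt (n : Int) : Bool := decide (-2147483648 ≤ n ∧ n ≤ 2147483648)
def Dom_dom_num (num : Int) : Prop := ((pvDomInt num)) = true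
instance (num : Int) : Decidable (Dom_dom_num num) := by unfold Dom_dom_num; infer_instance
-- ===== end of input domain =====

-- B replaces A's frequency-dict build plus key scan with a single any() over the
-- digits of str(num), counting each character directly with str.count (objective: simpler).
-- ===== PORT A =====
-- A builds a character-frequency dict over str(num), then scans the keys for one
-- whose count exceeds len(str(num))//2.
def dom_num (num : Int) : Bool :=
  let dic : PySem.Dict Char Int :=
    (PySem.Int.toStr num).toList.foldl
      (fun d i => if d.contains i then d.modify i 0 (· + 1) else d.insert i 1)
      PySem.Dict.empty
  dic.keys.any (fun key =>
    dic.getD key 0 > PySem.Int.floordiv ((PySem.Int.toStr num).toList.length : Int) 2)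

-- ===== PORT B =====
-- B: any() over the characters of str(num), counting with str.count (exact for a
-- single-character needle: equals List.count).
def dom_num_alt (num : Int) : Bool :=
  let s := (PySem.Int.toStr num).toList
  let half := PySem.Int.floordiv (s.length : Int) 2
  s.any (fun c => (s.count c : Int) > half)

-- ===== PRECONDITION & SPEC =====
def Spec_dom_num (num : Int) (out : Bool) : Prop := out = dom_num_alt num
instance (num : Int) (out : Bool) : Decidable (Spec_dom_num num out) := by unfold Spec_dom_num; infer_instance

-- ===== CLAIM (what is proved, stated in full; the proofs are below) =====
def Claim_equal_dom_num : Prop := ∀ (num : Int), Dom_dom_num num → Spec_dom_num num (dom_num num)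

-- ===== LEMMAS AND PROOFS =====

-- A's dict-building step is extensionally the Counter step.
theorem stepA_eq_counter_step :
    (fun (d : PySem.Dict Char Int) (i : Char) =>
        if d.contains i then d.modify i 0 (· + 1) else d.insert i 1)
      = (fun (d : PySem.Dict Char Int) (i : Char) => d.modify i 0 (· + 1)) := by
  funext d i
  by_cases h : d.contains i = true
  · simp [h]
  · simp only [Bool.not_eq_true] at h
    simp [h, PySem.Dict.modify, PySem.Dict.getD_of_not_contains]

theorem dic_eq_counter (l : List Char) :
    l.foldl (fun (d : PySem.Dict Char Int) i =>
        if d.contains i then d.modify i 0 (· + 1) else d.insert i 1) PySem.Dict.empty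
      = PySem.Dict.counter l := by
  rw [stepA_eq_counter_step, PySem.Dict.counter_eq_foldl]

theorem any_ofList (l : List Char) (p : Char → Bool) :
    (PySem.Set.ofList l).any p = l.any p := by
  rw [Bool.eq_iff_iff]
  simp only [List.any_eq_true]
  constructor
  · rintro ⟨x, hx, hp⟩; exact ⟨x, (PySem.Set.mem_ofList l x).mp hx, hp⟩
  · rintro ⟨x, hx, hp⟩; exact ⟨x, (PySem.Set.mem_ofList l x).mpr hx, hp⟩

-- ===== VERDICT (by name: the statement is the Claim_ definition above) =====
theorem dom_num_spec : Claim_equal_dom_num := by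
  intro num _
  unfold Spec_dom_num dom_num dom_num_alt
  simp only [dic_eq_counter, PySem.Dict.keys_counter, PySem.Dict.getD_counter, any_ofList]
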